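-- pv_equiv track=rewrite | github.com/eremidio/NUMBER-THEORY-ALGORITHMS | prime_counting_function_singlethread.py | set_settings
-- ===== SOURCE A (Python) =====
-- def set_settings(minimum:set, maximum:set)->set:
--     '''Função que define os elementos de um conjunto'''
--
--     #Procedimentos
--     #Checando os números de elementos
--     number_set:set=set([])
--
--     #Adicionando elementos no conjunto
--     if(minimum%2==0):
--       minimum+=1
--
--     for n in range(minimum, (maximum+1), 2):
--         if((n%30) in {1,7,11,13,17,19,23,29} and (n%7)>0):
--             number_set.add(n)
--
--     #Resultado
--     return number_set
-- ===== SOURCE B (Python) =====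
-- def set_settings(minimum: set, maximum: set) -> set:
--     # Sieve strategy: precompute the set of odd multiples of 3, 5 and 7 in range
--     # (three arithmetic progressions), then keep the odd numbers not in it.
--     m = minimum if minimum % 2 else minimum + 1
--     sieve = set()
--     for p in (3, 5, 7):
--         k = -((-m) // p)          # smallest k with p*k >= m
--         if k % 2 == 0:
--             k += 1                # smallest odd such k
--         sieve.update(range(p * k, maximum + 1, 2 * p))
--     return {n for n in range(m, maximum + 1, 2) if n not in sieve}
-- ===== Notes on version B (the rewrite author's own statement) =====
-- stated objective: alternative
-- what changed: A tests every odd number in the range with a per-element mod-30 wheel membership plus a mod-7 check; B instead precomputes the set of odd multiples of 3, 5 and 7 in range as three arithmetic progressions and keeps the odd numbers not in that sieve set, replacing per-element modular arithmetic with bulk progression generation and a hash-membership test.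
import Mathlib
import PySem

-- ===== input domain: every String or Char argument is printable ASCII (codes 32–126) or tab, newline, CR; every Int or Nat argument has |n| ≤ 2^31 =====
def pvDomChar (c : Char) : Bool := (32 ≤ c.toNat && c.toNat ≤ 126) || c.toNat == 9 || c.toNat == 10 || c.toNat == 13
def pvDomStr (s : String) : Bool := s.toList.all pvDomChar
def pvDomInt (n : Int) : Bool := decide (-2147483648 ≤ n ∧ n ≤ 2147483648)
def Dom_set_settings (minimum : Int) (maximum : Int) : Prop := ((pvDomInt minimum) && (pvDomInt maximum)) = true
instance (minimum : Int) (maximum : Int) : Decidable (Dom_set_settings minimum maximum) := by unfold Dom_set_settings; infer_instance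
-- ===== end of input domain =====

-- B replaces A's per-element mod-30/mod-7 wheel test with a sieve: it precomputes the set of
-- odd multiples of 3, 5 and 7 in range (three arithmetic progressions) and keeps the odd numbers
-- not in it; same return value, different strategy.

-- ===== PORT A =====
def set_settings (minimum : Int) (maximum : Int) : List Int :=
  let number_set : PySem.Set Int := PySem.Set.ofList []
  let minimum' := if PySem.Int.mod minimum 2 = 0 then minimum + 1 else minimum
  (PySem.List.pyRange minimum' (maximum + 1) 2).foldl
    (fun s n =>
      if PySem.Int.mod n 30 ∈ PySem.Set.ofList ([1, 7, 11, 13, 17, 19, 23, 29] : List Int)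
          ∧ PySem.Int.mod n 7 > 0
      then PySem.Set.add s n else s)
    number_set

-- ===== PORT B =====
def set_settings_alt (minimum : Int) (maximum : Int) : List Int :=
  let m := if PySem.Int.mod minimum 2 ≠ 0 then minimum else minimum + 1
  let sieve : PySem.Set Int := ([3, 5, 7] : List Int).foldl
    (fun s p =>
      let k := -(PySem.Int.floordiv (-m) p)
      let k := if PySem.Int.mod k 2 = 0 then k + 1 else k
      PySem.Set.update s (PySem.List.pyRange (p * k) (maximum + 1) (2 * p)))
    PySem.Set.empty
  PySem.Set.ofList ((PySem.List.pyRange m (maximum + 1) 2).filter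
    (fun n => !sieve.contains n))

-- ===== PRECONDITION & SPEC =====
def Spec_set_settings (minimum : Int) (maximum : Int) (out : List Int) : Prop := out = set_settings_alt minimum maximum
instance (minimum : Int) (maximum : Int) (out : List Int) : Decidable (Spec_set_settings minimum maximum out) := by unfold Spec_set_settings; infer_instance

-- ===== CLAIM (what is proved, stated in full; the proofs are below) =====
def Claim_equal_set_settings : Prop := ∀ (minimum : Int) (maximum : Int), Dom_set_settings minimum maximum → Spec_set_settings minimum maximum (set_settings minimum maximum)

-- ===== LEMMAS AND PROOFS =====

-- A's conditional-add fold over a duplicate-free list, started from a set disjoint from it,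
-- appends exactly the filtered list.
lemma foldl_add_if_filter (P : Int → Prop) [DecidablePred P] :
    ∀ (l s : List Int), l.Nodup → (∀ x ∈ l, x ∉ s) →
      l.foldl (fun s n => if P n then PySem.Set.add s n else s) s
        = s ++ l.filter (fun n => decide (P n)) := by
  intro l
  induction l with
  | nil => intro s _ _; simp
  | cons x xs ih =>
    intro s hnd hdisj
    have hxns : x ∉ s := hdisj x (by simp)
    by_cases hP : P x
    · have hadd : PySem.Set.add s x = s ++ [x] := by
        simp [PySem.Set.add, PySem.Set.contains, hxns]
      have htail : ∀ y ∈ xs, y ∉ s ++ [x] := by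
        intro y hy
        have hyx : y ≠ x := by
          intro h; subst h; exact (List.nodup_cons.mp hnd).1 hy
        have hys : y ∉ s := hdisj y (by simp [hy])
        simp [List.mem_append, hys, hyx]
      simp only [List.foldl_cons, if_pos hP, hadd,
        ih (s ++ [x]) (List.nodup_cons.mp hnd).2 htail,
        List.filter_cons, decide_eq_true hP]
      simp
    · simp only [List.foldl_cons, if_neg hP,
        ih s (List.nodup_cons.mp hnd).2 (fun y hy => hdisj y (by simp [hy])),
        List.filter_cons]
      simp [hP]

-- the step-2 range is duplicate-free
lemma nodup_range2 (m b : Int) : (PySem.List.pyRange m b 2).Nodup := by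
  rw [PySem.List.pyRange_of_pos m b (by norm_num)]
  exact List.nodup_range.map (fun a b h => by omega)

-- membership in the subtracted progression for p is exactly divisibility by p,
-- for odd n in [m, mx)
lemma mem_prog_iff (p m mx n : Int) (hp : 0 < p) (_hpo : p % 2 = 1)
    (hmn : m ≤ n) (hnmx : n < mx) (hn2 : n % 2 = 1) :
    (n ∈ PySem.List.pyRange
        (p * (if PySem.Int.mod (-(PySem.Int.floordiv (-m) p)) 2 = 0
              then -(PySem.Int.floordiv (-m) p) + 1
              else -(PySem.Int.floordiv (-m) p)))
        mx (2 * p)) ↔ p ∣ n := by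
  set k0 : Int := -(PySem.Int.floordiv (-m) p) with hk0def
  have hk0 : (k0 - 1) * p < m ∧ m ≤ k0 * p :=
    (PySem.Int.neg_floordiv_neg_eq_iff_of_pos hp).mp rfl
  have hmodk0 : PySem.Int.mod k0 2 = k0 % 2 := PySem.Int.mod_eq_emod_of_pos (by norm_num)
  set k1 : Int := if PySem.Int.mod k0 2 = 0 then k0 + 1 else k0 with hk1def
  have hk1odd : k1 % 2 = 1 := by
    rw [hk1def, hmodk0]
    split_ifs with h <;> omega
  have hk1lo : m ≤ k1 * p := by
    rw [hk1def]
    split_ifs with h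
    · calc m ≤ k0 * p := hk0.2
        _ ≤ (k0 + 1) * p := by nlinarith
    · exact hk0.2
  have hk1hi : (k1 - 2) * p < m := by
    rw [hk1def]
    split_ifs with h
    · calc (k0 + 1 - 2) * p ≤ (k0 - 1) * p := by nlinarith
        _ < m := hk0.1
    · calc (k0 - 2) * p ≤ (k0 - 1) * p := by nlinarith
        _ < m := hk0.1
  rw [PySem.List.mem_pyRange_iff_of_pos (by positivity)]
  constructor
  · rintro ⟨_, _, t, ht⟩
    exact ⟨k1 + 2 * t, by linear_combination ht⟩
  · rintro ⟨j, hj⟩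
    have hjodd : j % 2 = 1 := by
      have : Odd n := Int.odd_iff.mpr hn2
      rw [hj] at this
      exact Int.odd_iff.mp ((Int.odd_mul.mp this).2)
    have hjk1 : k1 ≤ j := by
      have h1 : (k1 - 2) * p < p * j := by rw [← hj]; exact lt_of_lt_of_le hk1hi hmn
      have h2 : k1 - 2 < j := by nlinarith
      omega
    refine ⟨by nlinarith, hnmx, ?_⟩
    obtain ⟨t, ht⟩ : (2 : Int) ∣ (j - k1) := by omega
    exact ⟨t, by rw [hj]; linear_combination p * ht⟩

-- the wheel condition on an odd integer is exactly coprimality to 3, 5 and 7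
lemma wheel_iff (n : Int) (h2 : n % 2 = 1) :
    ((PySem.Int.mod n 30 ∈ PySem.Set.ofList ([1, 7, 11, 13, 17, 19, 23, 29] : List Int))
        ∧ PySem.Int.mod n 7 > 0)
      ↔ (¬(3 ∣ n) ∧ ¬(5 ∣ n) ∧ ¬(7 ∣ n)) := by
  have hm30 : PySem.Int.mod n 30 = n % 30 := PySem.Int.mod_eq_emod_of_pos (by norm_num)
  have hm7 : PySem.Int.mod n 7 = n % 7 := PySem.Int.mod_eq_emod_of_pos (by norm_num)
  have h7 : PySem.Int.mod n 7 > 0 ↔ ¬(7 ∣ n) := by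
    rw [hm7, Int.dvd_iff_emod_eq_zero]
    have := Int.emod_nonneg n (by norm_num : (7:Int) ≠ 0)
    omega
  rw [hm30, PySem.Set.mem_ofList, h7]
  have h3 : (3 ∣ n) ↔ (3 ∣ n % 30) := by
    rw [Int.dvd_iff_emod_eq_zero, Int.dvd_iff_emod_eq_zero,
      Int.emod_emod_of_dvd n (by norm_num : (3:Int) ∣ 30)]
  have h5 : (5 ∣ n) ↔ (5 ∣ n % 30) := by
    rw [Int.dvd_iff_emod_eq_zero, Int.dvd_iff_emod_eq_zero,
      Int.emod_emod_of_dvd n (by norm_num : (5:Int) ∣ 30)]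
  have hr2 : n % 30 % 2 = 1 := by
    rw [Int.emod_emod_of_dvd n (by norm_num : (2:Int) ∣ 30)]; exact h2
  have hr0 : 0 ≤ n % 30 := Int.emod_nonneg n (by norm_num)
  have hr30 : n % 30 < 30 := Int.emod_lt_of_pos n (by norm_num)
  rw [h3, h5]
  set r := n % 30 with hr
  clear_value r
  constructor
  · rintro ⟨hmem, h7'⟩
    refine ⟨?_, ?_, h7'⟩ <;> (revert hmem; interval_cases r <;> decide)
  · rintro ⟨ha, hb, hc⟩
    refine ⟨?_, hc⟩
    revert ha hb hr2
    interval_cases r <;> decide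

theorem set_settings_spec : Claim_equal_set_settings := by
  intro minimum maximum _
  unfold Spec_set_settings set_settings set_settings_alt
  -- the two ways of bumping minimum to an odd value agree
  have hmin : (if PySem.Int.mod minimum 2 ≠ 0 then minimum else minimum + 1)
      = (if PySem.Int.mod minimum 2 = 0 then minimum + 1 else minimum) := by
    rcases eq_or_ne (PySem.Int.mod minimum 2) 0 with h | h
    · rw [if_neg (by simpa using h), if_pos h]
    · rw [if_pos h, if_neg h]
  rw [hmin]
  set m : Int := if PySem.Int.mod minimum 2 = 0 then minimum + 1 else minimum with hm
  have hmod : PySem.Int.mod minimum 2 = minimum % 2 :=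
    PySem.Int.mod_eq_emod_of_pos (by norm_num)
  have hmodd : m % 2 = 1 := by
    rw [hm, hmod]
    split_ifs with h <;> omega
  simp only [List.foldl_cons, List.foldl_nil]
  rw [foldl_add_if_filter _ _ _ (nodup_range2 m (maximum + 1)) (by simp [PySem.Set.ofList])]
  rw [PySem.Set.ofList_eq_self_of_nodup _ ((nodup_range2 m (maximum + 1)).filter _)]
  simp only [show (PySem.Set.ofList ([] : List Int)) = ([] : List Int) from rfl,
    List.nil_append]
  apply List.filter_congr
  intro n hn
  obtain ⟨hmn, hnb, t, ht⟩ := (PySem.List.mem_pyRange_iff_of_pos (by norm_num) n).mp hn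
  have hn2 : n % 2 = 1 := by omega
  have h3 := mem_prog_iff 3 m (maximum + 1) n (by norm_num) (by norm_num) hmn hnb hn2
  have h5 := mem_prog_iff 5 m (maximum + 1) n (by norm_num) (by norm_num) hmn hnb hn2
  have h7 := mem_prog_iff 7 m (maximum + 1) n (by norm_num) (by norm_num) hmn hnb hn2
  have hw := wheel_iff n hn2
  simp only [PySem.Set.contains, List.contains_eq_mem, PySem.Set.mem_update,
    ← decide_not, decide_eq_decide]
  rw [hw, h3, h5, h7]
  simp only [show (PySem.Set.empty : PySem.Set Int) = ([] : List Int) from rfl,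
    List.not_mem_nil, false_or]
  tauto
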